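-- pv_equiv track=rewrite | github.com/aria1th/Torus-Hamilton-Decomposition | RoundY/d5_color0_G3_defect_profile_check.py | defect_packets_formula
-- ===== SOURCE A (Python) =====
-- import itertools, collections, math, json
--
-- def defect_packets_formula(m):
--     zero = []; two = []
--     for q, w, v, u in itertools.product(range(m), repeat=4):
--         if q == 0 and v == 1:
--             zero.append((q, w, v, u))
--         if q == 0 and v == 0:
--             two.append((q, w, v, u))
--         if q == 2 and ((u != 4 and v == 3) or (u == 4 and v == 4)):
--             zero.append((q, w, v, u))
--         if q == 2 and ((u != 4 and v == 2) or (u == 4 and v == 3)):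
--             two.append((q, w, v, u))
--     return set(zero), set(two)
-- ===== SOURCE B (Python) =====
-- def defect_packets_formula(m):
--     R = range(m)
--     zero = set()
--     two = set()
--     if m >= 2:
--         for w in R:
--             for u in R:
--                 zero.add((0, w, 1, u))
--     for w in R:
--         for u in R:
--             two.add((0, w, 0, u))
--     if m >= 3:
--         for w in R:
--             if m >= 4:
--                 for u in R:
--                     if u != 4:
--                         zero.add((2, w, 3, u))
--             if m >= 5:
--                 zero.add((2, w, 4, 4))
--             for u in R:
--                 if u != 4:
--                     two.add((2, w, 2, u))
--             if m >= 5: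
--                 two.add((2, w, 3, 4))
--     return zero, two
-- ===== Notes on version B (the rewrite author's own statement) =====
-- stated objective: faster
-- what changed: Instead of scanning the full 4-dimensional product range(m)^4 and testing each quadruple, B enumerates only the free coordinates (w, u) directly for each qualifying fixed (q, v[, u]) pattern, guarded by range-membership checks on the fixed values.
import Mathlib
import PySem

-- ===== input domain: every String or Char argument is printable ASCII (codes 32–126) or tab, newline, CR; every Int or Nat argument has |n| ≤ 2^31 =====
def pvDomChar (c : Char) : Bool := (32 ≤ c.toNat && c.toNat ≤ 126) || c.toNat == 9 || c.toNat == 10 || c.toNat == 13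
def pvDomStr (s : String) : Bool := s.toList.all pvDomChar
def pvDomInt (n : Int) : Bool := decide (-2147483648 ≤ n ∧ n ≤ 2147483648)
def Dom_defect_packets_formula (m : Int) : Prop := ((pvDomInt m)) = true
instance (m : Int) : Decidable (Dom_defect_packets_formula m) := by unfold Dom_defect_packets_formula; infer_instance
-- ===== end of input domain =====

-- B enumerates only the free coordinates (w, u) for each qualifying fixed (q, v) pattern
-- instead of scanning the full 4-dimensional product: faster (asymptotic).


-- ===== PORT A =====
def defect_packets_formula (m : Int) : (List (Int × Int × Int × Int)) × (List (Int × Int × Int × Int)) :=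
  let r := PySem.List.pyRange 0 m 1
  -- itertools.product(range(m), repeat=4) in lexicographic order
  let prod := r.flatMap fun q => r.flatMap fun w => r.flatMap fun v => r.map fun u => (q, w, v, u)
  let acc := prod.foldl (fun (acc : List (Int × Int × Int × Int) × List (Int × Int × Int × Int)) t =>
      let (q, w, v, u) := t
      let acc := if q = 0 ∧ v = 1 then (acc.1 ++ [(q, w, v, u)], acc.2) else acc
      let acc := if q = 0 ∧ v = 0 then (acc.1, acc.2 ++ [(q, w, v, u)]) else acc
      let acc := if q = 2 ∧ ((u ≠ 4 ∧ v = 3) ∨ (u = 4 ∧ v = 4)) then (acc.1 ++ [(q, w, v, u)], acc.2) else acc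
      let acc := if q = 2 ∧ ((u ≠ 4 ∧ v = 2) ∨ (u = 4 ∧ v = 3)) then (acc.1, acc.2 ++ [(q, w, v, u)]) else acc
      acc) ([], [])
  (PySem.Set.ofList acc.1, PySem.Set.ofList acc.2)

-- ===== PORT B =====
def defect_packets_formula_alt (m : Int) : (List (Int × Int × Int × Int)) × (List (Int × Int × Int × Int)) :=
  let r := PySem.List.pyRange 0 m 1
  let zero : PySem.Set (Int × Int × Int × Int) := PySem.Set.empty
  let two : PySem.Set (Int × Int × Int × Int) := PySem.Set.empty
  let zero := if m ≥ 2 then r.foldl (fun z w => r.foldl (fun z u => PySem.Set.add z (0, w, 1, u)) z) zero else zero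
  let two := r.foldl (fun t w => r.foldl (fun t u => PySem.Set.add t (0, w, 0, u)) t) two
  let acc :=
    if m ≥ 3 then
      r.foldl (fun (acc : PySem.Set (Int × Int × Int × Int) × PySem.Set (Int × Int × Int × Int)) w =>
        let z := if m ≥ 4 then r.foldl (fun z u => if u != 4 then PySem.Set.add z (2, w, 3, u) else z) acc.1 else acc.1
        let z := if m ≥ 5 then PySem.Set.add z (2, w, 4, 4) else z
        let t := r.foldl (fun t u => if u != 4 then PySem.Set.add t (2, w, 2, u) else t) acc.2
        let t := if m ≥ 5 then PySem.Set.add t (2, w, 3, 4) else t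
        (z, t)) (zero, two)
    else (zero, two)
  acc

-- ===== PRECONDITION & SPEC =====
def Spec_defect_packets_formula (m : Int) (out : (List (Int × Int × Int × Int)) × (List (Int × Int × Int × Int))) : Prop := out = defect_packets_formula_alt m
instance (m : Int) (out : (List (Int × Int × Int × Int)) × (List (Int × Int × Int × Int))) : Decidable (Spec_defect_packets_formula m out) := by unfold Spec_defect_packets_formula; infer_instance

-- ===== CLAIM (what is proved, stated in full; the proofs are below) =====
def Claim_equal_defect_packets_formula : Prop := ∀ (m : Int), Dom_defect_packets_formula m → Spec_defect_packets_formula m (defect_packets_formula m)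

-- ===== LEMMAS AND PROOFS =====

def pvR (m : Int) : List Int := PySem.List.pyRange 0 m 1

theorem pvR_eq (m : Int) : pvR m = (List.range m.toNat).map (fun k : Nat => (k:Int)) := by
  simp [pvR, PySem.List.pyRange_one, List.map_eq_flatMap]

theorem pvR_flatMap (m : Int) {β : Type} (f : Int → List β) :
    (pvR m).flatMap f = (List.range m.toNat).flatMap (fun k : Nat => f (k:Int)) := by
  rw [pvR_eq, List.flatMap_map]


-- a fold that appends to both components splits into two flatMaps
theorem pv_foldl_pair {α β : Type} (g h : α → List β) :
    ∀ (l : List α) (z t : List β),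
      l.foldl (fun acc x => (acc.1 ++ g x, acc.2 ++ h x)) (z, t) = (z ++ l.flatMap g, t ++ l.flatMap h) := by
  intro l
  induction l with
  | nil => simp
  | cons x xs ih => intro z t; simp [ih]

-- flatMap over List.range of a function supported at one point
theorem pv_flatMap_range_one {β : Type} (a : Nat) (f : Nat → List β)
    (hf : ∀ k, k ≠ a → f k = []) :
    ∀ n, (List.range n).flatMap f = if a < n then f a else [] := by
  intro n
  induction n with
  | zero => simp
  | succ n ih =>
    rw [List.range_succ, List.flatMap_append, ih]
    simp only [List.flatMap_cons, List.flatMap_nil, List.append_nil]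
    by_cases hna : n = a
    · rw [hna, if_neg (Nat.lt_irrefl a), if_pos (Nat.lt_succ_self a), List.nil_append]
    · rw [hf n hna]
      by_cases han : a < n
      · rw [if_pos han, if_pos (by omega : a < n + 1), List.append_nil]
      · rw [if_neg han, if_neg (by omega : ¬ a < n + 1), List.append_nil]

-- flatMap over List.range of a function supported at two points a < b
theorem pv_flatMap_range_two {β : Type} (a b : Nat) (hab : a < b) (f : Nat → List β)
    (hf : ∀ k, k ≠ a → k ≠ b → f k = []) :
    ∀ n, (List.range n).flatMap f =
      (if a < n then f a else []) ++ (if b < n then f b else []) := by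
  intro n
  induction n with
  | zero => simp
  | succ n ih =>
    rw [List.range_succ, List.flatMap_append, ih]
    simp only [List.flatMap_cons, List.flatMap_nil, List.append_nil]
    by_cases hna : n = a
    · rw [hna, if_neg (Nat.lt_irrefl a), if_neg (by omega : ¬ b < a),
        if_pos (Nat.lt_succ_self a), if_neg (by omega : ¬ b < a + 1)]
      simp
    · by_cases hnb : n = b
      · rw [hnb, if_pos hab, if_neg (Nat.lt_irrefl b), if_pos (by omega : a < b + 1),
          if_pos (Nat.lt_succ_self b)]
        simp
      · rw [hf n hna hnb, List.append_nil]
        have e1 : a < n + 1 ↔ a < n := by omega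
        have e2 : b < n + 1 ↔ b < n := by omega
        simp only [e1, e2]

-- flatMap of a guarded singleton is filter-then-map

-- Int-level versions over pvR
theorem pv_flatMapR_one (m : Int) (a : Nat) {β : Type} (f : Int → List β)
    (hf : ∀ x : Int, x ≠ (a : Int) → f x = []) :
    (pvR m).flatMap f = if (a : Int) < m then f a else [] := by
  rw [pvR_flatMap]
  rw [pv_flatMap_range_one a (fun k => f (k : Int)) (fun k hk => hf _ (by exact_mod_cast fun h => hk (by exact_mod_cast h)))]
  have e : (a < m.toNat) ↔ ((a : Int) < m) := by omega
  simp only [e]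

theorem pv_flatMapR_two (m : Int) (a b : Nat) (hab : a < b) {β : Type} (f : Int → List β)
    (hf : ∀ x : Int, x ≠ (a : Int) → x ≠ (b : Int) → f x = []) :
    (pvR m).flatMap f = (if (a : Int) < m then f a else []) ++ (if (b : Int) < m then f b else []) := by
  rw [pvR_flatMap]
  rw [pv_flatMap_range_two a b hab (fun k => f (k : Int))
    (fun k hka hkb => hf _ (fun h => hka (by exact_mod_cast h)) (fun h => hkb (by exact_mod_cast h)))]
  have e1 : (a < m.toNat) ↔ ((a : Int) < m) := by omega
  have e2 : (b < m.toNat) ↔ ((b : Int) < m) := by omega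
  simp only [e1, e2]

theorem pv_flatMap_ite_singleton {α β : Type} (p : α → Bool) (f : α → β) :
    ∀ l : List α, l.flatMap (fun x => if p x then [f x] else []) = (l.filter p).map f := by
  intro l
  induction l with
  | nil => simp
  | cons x xs ih =>
    by_cases hx : p x = true
    · simp [hx, ih]
    · simp [hx, ih]

def pvGz (t : Int × Int × Int × Int) : List (Int × Int × Int × Int) :=
  (if t.1 = 0 ∧ t.2.2.1 = 1 then [t] else []) ++
  (if t.1 = 2 ∧ ((t.2.2.2 ≠ 4 ∧ t.2.2.1 = 3) ∨ (t.2.2.2 = 4 ∧ t.2.2.1 = 4)) then [t] else [])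

def pvGt (t : Int × Int × Int × Int) : List (Int × Int × Int × Int) :=
  (if t.1 = 0 ∧ t.2.2.1 = 0 then [t] else []) ++
  (if t.1 = 2 ∧ ((t.2.2.2 ≠ 4 ∧ t.2.2.1 = 2) ∨ (t.2.2.2 = 4 ∧ t.2.2.1 = 3)) then [t] else [])

-- A's loop body in split form
theorem pvA_step_eq :
    (fun (acc : List (Int × Int × Int × Int) × List (Int × Int × Int × Int)) (t : Int × Int × Int × Int) =>
      let (q, w, v, u) := t
      let acc := if q = 0 ∧ v = 1 then (acc.1 ++ [(q, w, v, u)], acc.2) else acc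
      let acc := if q = 0 ∧ v = 0 then (acc.1, acc.2 ++ [(q, w, v, u)]) else acc
      let acc := if q = 2 ∧ ((u ≠ 4 ∧ v = 3) ∨ (u = 4 ∧ v = 4)) then (acc.1 ++ [(q, w, v, u)], acc.2) else acc
      let acc := if q = 2 ∧ ((u ≠ 4 ∧ v = 2) ∨ (u = 4 ∧ v = 3)) then (acc.1, acc.2 ++ [(q, w, v, u)]) else acc
      acc)
    = fun acc t => (acc.1 ++ pvGz t, acc.2 ++ pvGt t) := by
  funext acc t
  obtain ⟨q, w, v, u⟩ := t
  simp only [pvGz, pvGt]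
  split_ifs <;> simp_all

-- the zero component of A's loop, evaluated
theorem pvZA_eval (m : Int) :
    ((pvR m).flatMap fun q => (pvR m).flatMap fun w => (pvR m).flatMap fun v => (pvR m).flatMap fun u => pvGz (q, w, v, u))
    = (if (0:Int) < m then ((pvR m).flatMap fun w => if (1:Int) < m then (pvR m).map (fun u => ((0:Int), w, (1:Int), u)) else []) else [])
      ++ (if (2:Int) < m then ((pvR m).flatMap fun w =>
            (if (3:Int) < m then ((pvR m).filter (fun u => u != 4)).map (fun u => ((2:Int), w, (3:Int), u)) else [])
            ++ (if (4:Int) < m then [((2:Int), w, (4:Int), (4:Int))] else [])) else []) := by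
  rw [pv_flatMapR_two m 0 2 (by omega) _ (by
    intro x hx0 hx2
    simp only [Nat.cast_zero, Nat.cast_ofNat] at hx0 hx2
    simp [List.flatMap_eq_nil_iff, pvGz, hx0, hx2])]
  simp only [Nat.cast_zero, Nat.cast_ofNat]
  congr 1
  · -- q = 0 block
    congr 1
    congr 1
    funext w
    rw [pv_flatMapR_one m 1 _ (by
      intro v hv
      simp only [Nat.cast_one] at hv
      simp [List.flatMap_eq_nil_iff, pvGz, hv])]
    simp only [Nat.cast_one]
    congr 1
    have : (fun u => pvGz (0, w, 1, u)) = (fun u => [((0:Int), w, (1:Int), u)]) := by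
      funext u; simp [pvGz]
    rw [this, ← List.map_eq_flatMap]
  · -- q = 2 block
    congr 1
    congr 1
    funext w
    rw [pv_flatMapR_two m 3 4 (by omega) _ (by
      intro v hv3 hv4
      simp only [Nat.cast_ofNat] at hv3 hv4
      simp [List.flatMap_eq_nil_iff, pvGz, hv3, hv4])]
    simp only [Nat.cast_ofNat]
    congr 1
    · congr 1
      have : (fun u => pvGz (2, w, 3, u)) = (fun u => if u != 4 then [((2:Int), w, (3:Int), u)] else []) := by
        funext u; by_cases h : u = 4 <;> simp [pvGz, h]
      rw [this, pv_flatMap_ite_singleton]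
    · rw [pv_flatMapR_one m 4 _ (by
        intro u hu
        simp only [Nat.cast_ofNat] at hu
        simp [pvGz, hu])]
      simp only [Nat.cast_ofNat]
      by_cases h : (4:Int) < m <;> simp [h, pvGz]

-- the two component of A's loop, evaluated
theorem pvTA_eval (m : Int) :
    ((pvR m).flatMap fun q => (pvR m).flatMap fun w => (pvR m).flatMap fun v => (pvR m).flatMap fun u => pvGt (q, w, v, u))
    = (if (0:Int) < m then ((pvR m).flatMap fun w => if (0:Int) < m then (pvR m).map (fun u => ((0:Int), w, (0:Int), u)) else []) else [])
      ++ (if (2:Int) < m then ((pvR m).flatMap fun w =>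
            (if (2:Int) < m then ((pvR m).filter (fun u => u != 4)).map (fun u => ((2:Int), w, (2:Int), u)) else [])
            ++ (if (3:Int) < m then (if (4:Int) < m then [((2:Int), w, (3:Int), (4:Int))] else []) else [])) else []) := by
  rw [pv_flatMapR_two m 0 2 (by omega) _ (by
    intro x hx0 hx2
    simp only [Nat.cast_zero, Nat.cast_ofNat] at hx0 hx2
    simp [List.flatMap_eq_nil_iff, pvGt, hx0, hx2])]
  simp only [Nat.cast_zero, Nat.cast_ofNat]
  congr 1
  · -- q = 0 block
    congr 1
    congr 1
    funext w
    rw [pv_flatMapR_one m 0 _ (by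
      intro v hv
      simp only [Nat.cast_zero] at hv
      simp [List.flatMap_eq_nil_iff, pvGt, hv])]
    simp only [Nat.cast_zero]
    congr 1
    have : (fun u => pvGt (0, w, 0, u)) = (fun u => [((0:Int), w, (0:Int), u)]) := by
      funext u; simp [pvGt]
    rw [this, ← List.map_eq_flatMap]
  · -- q = 2 block
    congr 1
    congr 1
    funext w
    rw [pv_flatMapR_two m 2 3 (by omega) _ (by
      intro v hv2 hv3
      simp only [Nat.cast_ofNat] at hv2 hv3
      simp [List.flatMap_eq_nil_iff, pvGt, hv2, hv3])]
    simp only [Nat.cast_ofNat]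
    congr 1
    · congr 1
      have : (fun u => pvGt (2, w, 2, u)) = (fun u => if u != 4 then [((2:Int), w, (2:Int), u)] else []) := by
        funext u; by_cases h : u = 4 <;> simp [pvGt, h]
      rw [this, pv_flatMap_ite_singleton]
    · congr 1
      rw [pv_flatMapR_one m 4 _ (by
        intro u hu
        simp only [Nat.cast_ofNat] at hu
        simp [pvGt, hu])]
      simp only [Nat.cast_ofNat]
      by_cases h : (4:Int) < m <;> simp [h, pvGt]

-- a fold whose two components do not interact splits into two folds
theorem pv_foldl_pair2 {α β γ : Type} (f : β → α → β) (g : γ → α → γ) :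
    ∀ (l : List α) (z : β) (t : γ),
      l.foldl (fun acc x => (f acc.1 x, g acc.2 x)) (z, t) = (l.foldl f z, l.foldl g t) := by
  intro l
  induction l with
  | nil => intro z t; rfl
  | cons x xs ih => intro z t; simp [ih]

-- folding over a flatMap is the nested fold
theorem pv_foldl_flatMap {α β γ : Type} (g : α → List β) (f : γ → β → γ) :
    ∀ (l : List α) (s : γ), (l.flatMap g).foldl f s = l.foldl (fun s x => (g x).foldl f s) s := by
  intro l
  induction l with
  | nil => intro s; rfl
  | cons x xs ih => intro s; simp [List.foldl_append, ih]

-- fold congruence on the same list and start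
theorem pv_foldl_congr {α β : Type} {f g : β → α → β} (l : List α) (s : β)
    (h : ∀ z x, x ∈ l → f z x = g z x) : l.foldl f s = l.foldl g s := by
  induction l generalizing s with
  | nil => rfl
  | cons x xs ih =>
    rw [List.foldl_cons, List.foldl_cons, h s x (by simp)]
    exact ih _ (fun z y hy => h z y (by simp [hy]))

-- an add-loop over mapped elements is a plain add-fold over the mapped list
theorem pv_addfold_map {β : Type} [BEq β] (l : List Int) (f : Int → β) (s : PySem.Set β) :
    l.foldl (fun z u => PySem.Set.add z (f u)) s = List.foldl PySem.Set.add s (l.map f) :=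
  (List.foldl_map).symm

-- a guarded add-loop is a plain add-fold over the filtered-and-mapped list
theorem pv_addfold_filter {β : Type} [BEq β] (l : List Int) (f : Int → β) (s : PySem.Set β) :
    l.foldl (fun z u => if u != 4 then PySem.Set.add z (f u) else z) s
      = List.foldl PySem.Set.add s ((l.filter (fun u => u != 4)).map f) := by
  rw [List.foldl_map, List.foldl_filter]

-- B's builder, rewritten as ofList of the concatenated per-case blocks
theorem pvB_eval (m : Int) :
    defect_packets_formula_alt m =
      (PySem.Set.ofList
         ((if m ≥ 2 then (pvR m).flatMap (fun w => (pvR m).map fun u => ((0:Int), w, (1:Int), u)) else []) ++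
          (if m ≥ 3 then
             (pvR m).flatMap (fun w =>
               (if m ≥ 4 then ((pvR m).filter (fun u => u != 4)).map (fun u => ((2:Int), w, (3:Int), u)) else []) ++
               (if m ≥ 5 then [((2:Int), w, (4:Int), (4:Int))] else []))
           else [])),
       PySem.Set.ofList
         (((pvR m).flatMap (fun w => (pvR m).map fun u => ((0:Int), w, (0:Int), u))) ++
          (if m ≥ 3 then
             (pvR m).flatMap (fun w =>
               ((pvR m).filter (fun u => u != 4)).map (fun u => ((2:Int), w, (2:Int), u)) ++
               (if m ≥ 5 then [((2:Int), w, (3:Int), (4:Int))] else []))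
           else []))) := by
  unfold defect_packets_formula_alt
  dsimp only
  have hr : PySem.List.pyRange 0 m 1 = pvR m := rfl
  rw [hr]
  -- the two starting sets as add-folds
  have hz0 : (if m ≥ 2 then (pvR m).foldl (fun z w => (pvR m).foldl (fun z u => PySem.Set.add z (0, w, 1, u)) z) PySem.Set.empty else PySem.Set.empty)
      = List.foldl PySem.Set.add ([] : PySem.Set (Int × Int × Int × Int))
          (if m ≥ 2 then (pvR m).flatMap (fun w => (pvR m).map fun u => ((0:Int), w, (1:Int), u)) else []) := by
    by_cases h2 : m ≥ 2 <;> simp only [h2, if_true, if_false]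
    · rw [pv_foldl_flatMap]
      exact pv_foldl_congr _ _ (fun z w _ => pv_addfold_map (pvR m) _ z)
    · rfl
  have ht0 : (pvR m).foldl (fun t w => (pvR m).foldl (fun t u => PySem.Set.add t (0, w, 0, u)) t) PySem.Set.empty
      = List.foldl PySem.Set.add ([] : PySem.Set (Int × Int × Int × Int))
          ((pvR m).flatMap (fun w => (pvR m).map fun u => ((0:Int), w, (0:Int), u))) := by
    rw [pv_foldl_flatMap]
    exact pv_foldl_congr _ _ (fun t w _ => pv_addfold_map (pvR m) _ t)
  rw [hz0, ht0]
  -- split the m ≥ 3 pair-fold and turn each component into an add-fold over its block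
  by_cases h3 : m ≥ 3 <;> simp only [h3, if_true, if_false]
  · rw [pv_foldl_pair2
      (fun z w => if m ≥ 5 then PySem.Set.add (if m ≥ 4 then (pvR m).foldl (fun z u => if u != 4 then PySem.Set.add z (2, w, 3, u) else z) z else z) (2, w, 4, 4) else (if m ≥ 4 then (pvR m).foldl (fun z u => if u != 4 then PySem.Set.add z (2, w, 3, u) else z) z else z))
      (fun t w => if m ≥ 5 then PySem.Set.add ((pvR m).foldl (fun t u => if u != 4 then PySem.Set.add t (2, w, 2, u) else t) t) (2, w, 3, 4) else (pvR m).foldl (fun t u => if u != 4 then PySem.Set.add t (2, w, 2, u) else t) t)]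
    refine Prod.ext ?_ ?_ <;> simp only
    · conv_rhs => rw [PySem.Set.ofList_eq_foldl, List.foldl_append, pv_foldl_flatMap]
      refine pv_foldl_congr _ _ ?_
      intro z w _
      rw [List.foldl_append, pv_addfold_filter]
      by_cases h4 : m ≥ 4 <;> by_cases h5 : m ≥ 5 <;>
        simp only [h4, h5, if_true, if_false, List.foldl_nil, List.foldl_cons] <;> rfl
    · conv_rhs => rw [PySem.Set.ofList_eq_foldl, List.foldl_append, pv_foldl_flatMap]
      refine pv_foldl_congr _ _ ?_
      intro t w _
      rw [List.foldl_append, pv_addfold_filter]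
      by_cases h5 : m ≥ 5 <;>
        simp only [h5, if_true, if_false, List.foldl_nil, List.foldl_cons] <;> rfl
  · simp [PySem.Set.ofList_eq_foldl]

theorem pv_main (m : Int) : defect_packets_formula m = defect_packets_formula_alt m := by
  rw [pvB_eval]
  unfold defect_packets_formula
  dsimp only
  have hr : PySem.List.pyRange 0 m 1 = pvR m := rfl
  rw [pvA_step_eq, pv_foldl_pair]
  simp only [List.nil_append, List.flatMap_assoc, List.flatMap_map]
  rw [hr]
  rw [pvZA_eval, pvTA_eval]
  have e2 : (m ≥ 2) = ((1:Int) < m) := propext (by omega)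
  have e3 : (m ≥ 3) = ((2:Int) < m) := propext (by omega)
  have e4 : (m ≥ 4) = ((3:Int) < m) := propext (by omega)
  have e5 : (m ≥ 5) = ((4:Int) < m) := propext (by omega)
  have hnil : m ≤ 0 → pvR m = [] := by
    intro h
    rw [pvR_eq]
    simp [Int.toNat_of_nonpos h]
  simp only [e2, e3, e4, e5]
  refine Prod.ext ?_ ?_ <;> simp only
  · -- zero component
    congr 1
    by_cases hc : (2:Int) < m <;> simp only [hc, if_true, if_false]
    · by_cases h1 : (1:Int) < m
      · simp [h1, show (0:Int) < m by omega]
      · by_cases h0 : (0:Int) < m <;> simp [h0, h1]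
    · by_cases h1 : (1:Int) < m
      · simp [h1, show (0:Int) < m by omega]
      · by_cases h0 : (0:Int) < m <;> simp [h0, h1]
  · -- two component
    congr 1
    by_cases hc : (2:Int) < m <;> simp only [hc, if_true, if_false]
    · have h0 : (0:Int) < m := by omega
      simp only [h0, if_true]
      congr 1
      congr 1
      funext w
      by_cases h4 : (4:Int) < m
      · simp [h4, show (3:Int) < m by omega]
      · by_cases h3 : (3:Int) < m <;> simp [h3, h4]
    · by_cases h0 : (0:Int) < m
      · simp [h0]
      · simp [h0, hnil (by omega)]

-- ===== VERDICT (by name: the statement is the Claim_ definition above) =====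
theorem defect_packets_formula_spec : Claim_equal_defect_packets_formula := by
  intro m _
  exact pv_main m
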